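-- pv_equiv track=rewrite | github.com/valen1013/MINIPROYECTO-I-E | miniproyecto2/ec.py | Ytoria
-- ===== SOURCE A (Python) =====
-- def Ytoria(lista_forms):
--     form = ''
--     inicial = True
--     for f in lista_forms:
--         if inicial:
--             form = f
--             inicial = False
--         else:
--             form = '(' + form + '∧' + f + ')'
--     return form
-- ===== SOURCE B (Python) =====
-- def Ytoria(lista_forms):
--     items = list(lista_forms)
--     if not items:
--         return ''
--     return '(' * (len(items) - 1) + items[0] + ''.join('\u2227' + f + ')' for f in items[1:])
-- ===== Notes on version B (the rewrite author's own statement) =====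
-- stated objective: faster
-- what changed: Replaces the incremental re-wrapping loop (each step rebuilds the whole accumulated string inside new parentheses) by a single-pass assembly: precompute the '(' prefix from the length and join flat '∧f)' suffixes.
import Mathlib
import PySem

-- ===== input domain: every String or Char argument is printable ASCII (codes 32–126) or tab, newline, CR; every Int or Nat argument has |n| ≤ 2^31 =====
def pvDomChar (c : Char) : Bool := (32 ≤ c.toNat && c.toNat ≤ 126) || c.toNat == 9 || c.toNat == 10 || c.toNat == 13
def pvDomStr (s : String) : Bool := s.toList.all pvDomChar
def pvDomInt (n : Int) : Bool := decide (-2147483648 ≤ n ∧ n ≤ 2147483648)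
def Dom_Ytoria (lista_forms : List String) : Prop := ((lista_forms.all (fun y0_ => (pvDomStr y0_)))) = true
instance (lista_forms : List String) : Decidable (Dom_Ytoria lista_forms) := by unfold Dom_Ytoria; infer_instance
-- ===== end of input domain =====

-- B replaces A's incremental re-wrapping loop by a single-pass assembly:
-- '(' * (n-1) prefix, first element, then joined flat '∧f)' suffixes. Objective: a faster (linear vs quadratic concatenation) single-pass assembly; timing run measured B faster.

-- ===== PORT A =====
-- A: fold over the list carrying (form, inicial), wrapping on each non-first element.
def Ytoria (lista_forms : List String) : String :=
  (lista_forms.foldl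
    (fun (st : String × Bool) f =>
      if st.2 then (f, false) else ("(" ++ st.1 ++ "∧" ++ f ++ ")", false))
    ("", true)).1

-- ===== PORT B =====
def Ytoria_alt (lista_forms : List String) : String :=
  match lista_forms with
  | [] => ""
  | x :: rest =>
    String.ofList (List.replicate rest.length '(') ++ x
      ++ String.join (rest.map (fun f => "∧" ++ f ++ ")"))

-- ===== PRECONDITION & SPEC =====
def Spec_Ytoria (lista_forms : List String) (out : String) : Prop := out = Ytoria_alt lista_forms
instance (lista_forms : List String) (out : String) : Decidable (Spec_Ytoria lista_forms out) := by unfold Spec_Ytoria; infer_instance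

-- ===== CLAIM (what is proved, stated in full; the proofs are below) =====
def Claim_equal_Ytoria : Prop := ∀ (lista_forms : List String), Dom_Ytoria lista_forms → Spec_Ytoria lista_forms (Ytoria lista_forms)

-- ===== LEMMAS AND PROOFS =====
theorem join_shift (l : List String) (s : String) :
    List.foldl (fun r t => r ++ t) s l = s ++ List.foldl (fun r t => r ++ t) "" l := by
  induction l generalizing s with
  | nil => simp
  | cons a t ih =>
    rw [List.foldl_cons, List.foldl_cons, ih (s ++ a), ih ("" ++ a)]
    simp [String.append_assoc]

theorem join_cons (x : String) (l : List String) :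
    String.join (x :: l) = x ++ String.join l := by
  unfold String.join
  rw [List.foldl_cons, join_shift]
  simp

theorem Ytoria_loop (l : List String) (s : String) :
    (l.foldl
      (fun (st : String × Bool) f =>
        if st.2 then (f, false) else ("(" ++ st.1 ++ "∧" ++ f ++ ")", false))
      (s, false)).1
    = String.ofList (List.replicate l.length '(') ++ s
      ++ String.join (l.map (fun f => "∧" ++ f ++ ")")) := by
  induction l generalizing s with
  | nil =>
    apply String.ext
    simp [String.join]
  | cons a t ih =>
    simp only [List.foldl_cons, if_neg Bool.false_ne_true, List.length_cons, List.map_cons,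
      join_cons, ih]
    apply String.ext
    simp [List.replicate_succ', List.append_assoc]

-- ===== VERDICT (by name: the statement is the Claim_ definition above) =====
theorem Ytoria_spec : Claim_equal_Ytoria := by
  intro l _
  unfold Spec_Ytoria Ytoria Ytoria_alt
  cases l with
  | nil => rfl
  | cons a t =>
    simp only [List.foldl_cons]
    exact Ytoria_loop t a
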